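-- pv_equiv track=rewrite | github.com/PflegerJ/capstone | wowclp.py | parse_school_flag
-- ===== SOURCE A (Python) =====
-- def parse_school_flag(school):
--     s = int(school, 0) if isinstance(school, str) else school
--
--     res = []
--     school_map = {
--         0x1: 'Physical',
--         0x2: 'Holy',
--         0x4: 'Fire',
--         0x8: 'Nature',
--         0x10: 'Frost',
--         0x20: 'Shadow',
--         0x40: 'Arcane',
--     }
--
--     for (k, v) in iter(school_map.items()):
--         if (s & k) > 0: res.append(v)
--
--     return res
-- ===== SOURCE B (Python) =====
-- def parse_school_flag(school):
--     s = int(school, 0) if isinstance(school, str) else school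
--     name_by_bit = {
--         0x1: 'Physical',
--         0x2: 'Holy',
--         0x4: 'Fire',
--         0x8: 'Nature',
--         0x10: 'Frost',
--         0x20: 'Shadow',
--         0x40: 'Arcane',
--     }
--     m = s & 0x7F
--     res = []
--     while m:
--         lb = m & -m          # lowest set bit; bits come out in increasing value order
--         res.append(name_by_bit[lb])
--         m ^= lb
--     return res
-- ===== Notes on version B (the rewrite author's own statement) =====
-- stated objective: alternative
-- what changed: Instead of scanning all 7 table entries and testing s & k for each, B masks to m = s & 0x7F and iterates only the actually-set bits via lb = m & -m / m ^= lb, looking each bit's name up in a bit-value-keyed dict.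
import Mathlib
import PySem

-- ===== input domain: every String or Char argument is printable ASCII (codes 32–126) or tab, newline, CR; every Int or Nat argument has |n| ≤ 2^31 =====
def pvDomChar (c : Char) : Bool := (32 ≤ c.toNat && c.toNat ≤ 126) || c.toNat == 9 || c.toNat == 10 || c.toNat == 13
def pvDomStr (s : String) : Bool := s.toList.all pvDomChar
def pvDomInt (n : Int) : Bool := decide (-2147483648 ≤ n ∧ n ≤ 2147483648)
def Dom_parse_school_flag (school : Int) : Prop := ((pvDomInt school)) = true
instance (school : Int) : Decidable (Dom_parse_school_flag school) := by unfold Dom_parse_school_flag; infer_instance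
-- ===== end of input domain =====

-- B replaces A's full scan of the 7-entry school table by extracting the set bits of
-- (school & 0x7F) lowest-first with m & -m; same return value, different traversal.


-- ===== PORT A =====
-- literal port of A; `school` is an int here, so the `isinstance(school, str)` branch is dead
def parse_school_flag (school : Int) : List String :=
  let s := school
  let school_map : PySem.Dict Int String := PySem.Dict.mk
    [(0x1, "Physical"), (0x2, "Holy"), (0x4, "Fire"), (0x8, "Nature"),
     (0x10, "Frost"), (0x20, "Shadow"), (0x40, "Arcane")]
  school_map.items.foldl
    (fun res kv => if PySem.Int.band s kv.1 > 0 then res ++ [kv.2] else res) []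

-- ===== PORT B =====
def pvSchoolNames : PySem.Dict Int String := PySem.Dict.mk
  [(0x1, "Physical"), (0x2, "Holy"), (0x4, "Fire"), (0x8, "Nature"),
   (0x10, "Frost"), (0x20, "Shadow"), (0x40, "Arcane")]

-- the `while m:` loop; fuel 7 only makes it total (m has at most 7 set bits, one is
-- cleared per iteration, so the fuel is never exhausted on reachable states).
-- `name_by_bit[lb]` can never raise (lb is a single bit of a 7-bit mask), so the
-- `.getD ""` default of the port is unreachable.
def pvBitLoop : Nat → Int → List String → List String
  | 0, _, res => res
  | fuel + 1, m, res =>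
    if m ≠ 0 then
      let lb := PySem.Int.band m (-m)
      pvBitLoop fuel (PySem.Int.bxor m lb) (res ++ [(pvSchoolNames.get? lb).getD ""])
    else res

def parse_school_flag_alt (school : Int) : List String :=
  pvBitLoop 7 (PySem.Int.band school 127) []

-- ===== PRECONDITION & SPEC =====
def Spec_parse_school_flag (school : Int) (out : List String) : Prop := out = parse_school_flag_alt school
instance (school : Int) (out : List String) : Decidable (Spec_parse_school_flag school out) := by unfold Spec_parse_school_flag; infer_instance

-- ===== CLAIM (what is proved, stated in full; the proofs are below) =====
def Claim_equal_parse_school_flag : Prop := ∀ (school : Int), Dom_parse_school_flag school → Spec_parse_school_flag school (parse_school_flag school)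

-- ===== LEMMAS AND PROOFS =====

-- 7-bit Nat facts, by computation
set_option maxRecDepth 10000 in
theorem pv_nat_mask_sub : ∀ x < 128, ∀ b < 128, (127 - x) &&& b = b - (b &&& x) := by decide

theorem pv_and127 (b : Nat) (hb : b < 128) : b &&& 127 = b := by
  have : (127 : Nat) = 2 ^ 7 - 1 := by norm_num
  rw [this, Nat.and_two_pow_sub_one_eq_mod, Nat.mod_eq_of_lt (by omega)]

theorem pv_127and (b : Nat) (hb : b < 128) : 127 &&& b = b := by
  rw [Nat.land_comm]; exact pv_and127 b hb

-- masking to the low 7 bits does not change a subsequent & with a 7-bit constant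
theorem pv_band_small (s k : Int) (hk0 : 0 ≤ k) (hk : k < 128) :
    PySem.Int.band s k = PySem.Int.band (PySem.Int.band s 127) k := by
  have hkn : k.toNat < 128 := by omega
  by_cases hs : 0 ≤ s
  · rw [PySem.Int.band_of_nonneg hs hk0, PySem.Int.band_of_nonneg hs (by norm_num : (0:Int) ≤ 127),
        PySem.Int.band_of_nonneg (by positivity) hk0]
    have : ((127 : Int)).toNat = 127 := rfl
    rw [this, Int.toNat_natCast, Nat.land_assoc, pv_127and k.toNat hkn]
  · have hdef : ∀ b : Int, 0 ≤ b →
        PySem.Int.band s b = ((b.toNat - (b.toNat &&& (-s - 1).toNat) : Nat) : Int) := by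
      intro b hb
      simp only [PySem.Int.band, if_neg hs, if_pos hb]
    rw [hdef k hk0, hdef 127 (by norm_num)]
    rw [PySem.Int.band_of_nonneg (by positivity) hk0, Int.toNat_natCast]
    have h127 : ((127 : Int)).toNat = 127 := rfl
    rw [h127]
    set t := (-s - 1).toNat with ht
    have h1 : 127 &&& t = t % 128 := by
      have : (127 : Nat) = 2 ^ 7 - 1 := by norm_num
      rw [Nat.land_comm, this, Nat.and_two_pow_sub_one_eq_mod]
    have h2 : k.toNat &&& t = k.toNat &&& (t % 128) := by
      conv_lhs => rw [← pv_and127 k.toNat hkn]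
      rw [Nat.land_assoc, h1]
    rw [h1, h2, pv_nat_mask_sub (t % 128) (Nat.mod_lt _ (by omega)) k.toNat hkn]
theorem pv_band127_bounds (s : Int) : 0 ≤ PySem.Int.band s 127 ∧ PySem.Int.band s 127 < 128 := by
  by_cases hs : 0 ≤ s
  · rw [PySem.Int.band_of_nonneg hs (by norm_num : (0:Int) ≤ 127)]
    have : s.toNat &&& ((127 : Int)).toNat ≤ 127 := Nat.and_le_right
    omega
  · simp only [PySem.Int.band, if_neg hs, if_pos (by norm_num : (0:Int) ≤ 127)]
    have : ((127 : Int)).toNat = 127 := rfl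
    rw [this]
    omega

set_option maxRecDepth 4000 in
theorem pv_key : ∀ n : Nat, n < 128 → parse_school_flag (↑n) = parse_school_flag_alt (↑n) := by
  decide

theorem parse_school_flag_spec : Claim_equal_parse_school_flag := by
  intro s _
  unfold Spec_parse_school_flag
  obtain ⟨h0, h1⟩ := pv_band127_bounds s
  have hAm : parse_school_flag s = parse_school_flag (PySem.Int.band s 127) := by
    show (PySem.Dict.mk _).items.foldl
        (fun res kv => if PySem.Int.band s kv.1 > 0 then res ++ [kv.2] else res) []
      = (PySem.Dict.mk _).items.foldl
        (fun res kv => if PySem.Int.band (PySem.Int.band s 127) kv.1 > 0 then res ++ [kv.2] else res) []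
    simp only [List.foldl]
    rw [pv_band_small s 1 (by norm_num) (by norm_num),
        pv_band_small s 2 (by norm_num) (by norm_num),
        pv_band_small s 4 (by norm_num) (by norm_num),
        pv_band_small s 8 (by norm_num) (by norm_num),
        pv_band_small s 16 (by norm_num) (by norm_num),
        pv_band_small s 32 (by norm_num) (by norm_num),
        pv_band_small s 64 (by norm_num) (by norm_num)]
  have hBm : parse_school_flag_alt (PySem.Int.band s 127) = parse_school_flag_alt s := by
    unfold parse_school_flag_alt
    rw [← pv_band_small s 127 (by norm_num) (by norm_num)]
  have hn : PySem.Int.band s 127 = ((PySem.Int.band s 127).toNat : Int) :=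
    (Int.toNat_of_nonneg h0).symm
  rw [hAm, ← hBm, hn]
  exact pv_key (PySem.Int.band s 127).toNat (by omega)
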